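-- pv_equiv track=rewrite | github.com/az9713/photo-organizer-kiro | tensorflow_photo_organizer.py | _categorize_by_content
-- ===== SOURCE A (Python) =====
-- def _categorize_by_content(images):
--     """Group images by content tags."""
--     categories = {}
--
--     for img_path, features in images.items():
--         content_tags = features.get('content_tags', [])
--
--         for tag in content_tags:
--             if tag not in categories:
--                 categories[tag] = []
--             categories[tag].append(img_path)
--
--     # Remove categories with fewer than 2 images
--     return {k: v for k, v in categories.items() if len(v) >= 2}
-- ===== SOURCE B (Python) =====
-- def _categorize_by_content(images):
--     """Group images by content tags, two-pass: tag frequency index, then build."""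
--     # Pass 1: frequency table over all tag occurrences (no paths stored).
--     freq = {}
--     for features in images.values():
--         for tag in features.get('content_tags', []):
--             freq[tag] = freq.get(tag, 0) + 1
--     # Pass 2: build the result, keeping only tags occurring >= 2 times.
--     result = {}
--     for img_path, features in images.items():
--         for tag in features.get('content_tags', []):
--             if freq[tag] >= 2:
--                 result.setdefault(tag, []).append(img_path)
--     return result
-- ===== Notes on version B (the rewrite author's own statement) =====
-- stated objective: alternative
-- what changed: A builds every group in one pass and filters out groups with fewer than 2 paths at the end; B first builds a tag-frequency index over all tag occurrences (storing no paths), then a second pass appends paths only for tags with frequency >= 2, so no final filtering step exists.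
import Mathlib
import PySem

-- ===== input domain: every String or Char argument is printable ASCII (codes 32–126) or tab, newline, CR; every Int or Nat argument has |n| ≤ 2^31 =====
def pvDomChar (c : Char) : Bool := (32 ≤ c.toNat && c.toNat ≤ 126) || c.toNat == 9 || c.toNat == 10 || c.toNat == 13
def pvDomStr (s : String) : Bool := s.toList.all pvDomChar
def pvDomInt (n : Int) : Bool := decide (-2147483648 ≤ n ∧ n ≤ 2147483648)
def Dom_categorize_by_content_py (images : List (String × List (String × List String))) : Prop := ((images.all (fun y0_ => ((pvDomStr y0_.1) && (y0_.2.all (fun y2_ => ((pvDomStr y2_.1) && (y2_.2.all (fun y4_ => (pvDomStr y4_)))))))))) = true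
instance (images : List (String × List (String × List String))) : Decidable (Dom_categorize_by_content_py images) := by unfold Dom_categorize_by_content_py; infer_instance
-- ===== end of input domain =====

-- B replaces A's group-then-filter single pass by a two-pass decomposition (tag-frequency index, then build); alternative, not faster.


-- ===== PORT A =====
-- A: one pass building all groups (insert-empty-if-absent + append), then a filter keeping groups of size ≥ 2.
def categorize_by_content_py (images : List (String × List (String × List String))) : List (String × List String) :=
  let categories : PySem.Dict String (List String) :=
    images.foldl (fun cats img =>
      let content_tags := (PySem.Dict.mk img.2).getD "content_tags" []
      content_tags.foldl (fun cats tag =>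
        let cats := if cats.contains tag then cats else cats.insert tag []
        cats.modify tag [] (fun v => v ++ [img.1])) cats)
      PySem.Dict.empty
  categories.items.filter (fun kv => 2 ≤ kv.2.length)

-- ===== PORT B =====
-- B: pass 1 builds a tag-frequency table (no paths stored); pass 2 rebuilds, keeping only tags of frequency ≥ 2; no final filter.
def categorize_by_content_py_alt (images : List (String × List (String × List String))) : List (String × List String) :=
  let freq : PySem.Dict String Int :=
    images.foldl (fun d img =>
      ((PySem.Dict.mk img.2).getD "content_tags" []).foldl
        (fun d tag => d.insert tag (d.getD tag 0 + 1)) d)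
      PySem.Dict.empty
  let result : PySem.Dict String (List String) :=
    images.foldl (fun r img =>
      ((PySem.Dict.mk img.2).getD "content_tags" []).foldl
        (fun r tag =>
          if 2 ≤ freq.getD tag 0 then r.modify tag [] (fun v => v ++ [img.1]) else r) r)
      PySem.Dict.empty
  result.items

-- ===== PRECONDITION & SPEC =====
def Spec_categorize_by_content_py (images : List (String × List (String × List String))) (out : List (String × List String)) : Prop := out = categorize_by_content_py_alt images
instance (images : List (String × List (String × List String))) (out : List (String × List String)) : Decidable (Spec_categorize_by_content_py images out) := by unfold Spec_categorize_by_content_py; infer_instance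

-- ===== CLAIM (what is proved, stated in full; the proofs are below) =====
def Claim_equal_categorize_by_content_py : Prop := ∀ (images : List (String × List (String × List String))), Dom_categorize_by_content_py images → Spec_categorize_by_content_py images (categorize_by_content_py images)

-- ===== LEMMAS AND PROOFS =====

-- the tag list of one image record (features.get('content_tags', []))
def pvTags (img : String × List (String × List String)) : List String :=
  (PySem.Dict.mk img.2).getD "content_tags" []

-- all (tag, path) occurrences in iteration order
def pvPairs (images : List (String × List (String × List String))) : List (String × String) :=
  images.flatMap (fun img => (pvTags img).map (fun t => (t, img.1)))

-- the flat stream of tag occurrences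
def pvAllTags (images : List (String × List (String × List String))) : List String :=
  images.flatMap pvTags

theorem pvPairs_map_fst (images : List (String × List (String × List String))) :
    (pvPairs images).map (·.1) = pvAllTags images := by
  simp [pvPairs, pvAllTags, List.map_flatMap, Function.comp_def]

-- A's insert-if-absent-then-append step is a plain modify step
theorem pv_step_eq (d : PySem.Dict String (List String)) (t p : String) :
    (if d.contains t then d else d.insert t []).modify t [] (fun v => v ++ [p])
      = d.modify t [] (fun v => v ++ [p]) := by
  by_cases h : d.contains t
  · simp [h]
  · have h' : d.contains t = false := by simpa using h
    rw [if_neg h]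
    simp [PySem.Dict.modify, PySem.Dict.insert_insert_self, PySem.Dict.getD_insert_self,
      PySem.Dict.getD_of_not_contains (h := h')]

-- A's group dict as a single fold over the flattened (tag, path) stream
theorem pv_catsA_eq (images : List (String × List (String × List String))) :
    images.foldl (fun cats img =>
        (pvTags img).foldl (fun cats tag =>
          (if cats.contains tag then cats else cats.insert tag []).modify tag []
            (fun v => v ++ [img.1])) cats) PySem.Dict.empty
      = (pvPairs images).foldl (fun d p => d.modify p.1 [] (fun v => v ++ [p.2]))
          PySem.Dict.empty := by
  rw [pvPairs, List.foldl_flatMap]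
  simp only [List.foldl_map, pv_step_eq]

-- B's build pass as a single fold over the filtered (tag, path) stream
theorem pv_res_eq (images : List (String × List (String × List String)))
    (F : PySem.Dict String Int) :
    images.foldl (fun r img =>
        (pvTags img).foldl (fun r tag =>
          if 2 ≤ F.getD tag 0 then r.modify tag [] (fun v => v ++ [img.1]) else r) r)
      PySem.Dict.empty
      = ((pvPairs images).filter (fun p => decide (2 ≤ F.getD p.1 0))).foldl
          (fun d p => d.modify p.1 [] (fun v => v ++ [p.2])) PySem.Dict.empty := by
  rw [List.foldl_filter, pvPairs, List.foldl_flatMap]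
  simp only [List.foldl_map, decide_eq_true_eq]

-- B's frequency dict counts tag occurrences
theorem pv_freq_getD (images : List (String × List (String × List String))) (t : String) :
    (images.foldl (fun d img =>
        (pvTags img).foldl (fun d tag => d.insert tag (d.getD tag 0 + 1)) d)
        PySem.Dict.empty).getD t 0 = ((pvAllTags images).count t : Int) := by
  have h : images.foldl (fun d img =>
        (pvTags img).foldl (fun d tag => d.insert tag (d.getD tag 0 + 1)) d)
        (PySem.Dict.empty : PySem.Dict String Int)
      = (pvAllTags images).foldl (fun d tag => d.insert tag (d.getD tag 0 + 1))
          PySem.Dict.empty := by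
    rw [pvAllTags, List.foldl_flatMap]
  rw [h]
  rw [PySem.Dict.getD_foldl_insert_add_one, PySem.Dict.getD_empty]
  simp

-- ordered dedup commutes with filter (accumulator form)
theorem pv_ofList_filter {α : Type} [BEq α] [LawfulBEq α] (q : α → Bool) (l s : List α) :
    (l.foldl PySem.Set.add s).filter q = (l.filter q).foldl PySem.Set.add (s.filter q) := by
  induction l generalizing s with
  | nil => simp
  | cons x xs ih =>
    by_cases hq : q x
    · simp only [List.foldl_cons, List.filter_cons, hq, if_true, List.foldl_cons, ih]
      congr 1
      by_cases hm : x ∈ s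
      · have hm' : x ∈ s.filter q := List.mem_filter.mpr ⟨hm, hq⟩
        simp [PySem.Set.add, hm, hm']
      · have hm' : x ∉ s.filter q := fun h => hm (List.mem_filter.mp h).1
        simp [PySem.Set.add, hm, hm', List.filter_append, hq]
    · have hq' : q x = false := by simpa using hq
      simp only [List.foldl_cons, List.filter_cons, hq', ih]
      congr 1
      by_cases hm : x ∈ s
      · simp [PySem.Set.add, hm]
      · simp [PySem.Set.add, hm, List.filter_append, hq']

theorem pv_ofList_filter' {α : Type} [BEq α] [LawfulBEq α] (q : α → Bool) (l : List α) :
    (PySem.Set.ofList l).filter q = PySem.Set.ofList (l.filter q) := by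
  simpa [PySem.Set.ofList, PySem.Set.empty] using pv_ofList_filter q l []

-- the whole equivalence, over the flattened stream
theorem pv_main (images : List (String × List (String × List String)))
    (F : PySem.Dict String Int)
    (hFq : ∀ t, F.getD t 0 = ((pvAllTags images).count t : Int)) :
    List.filter (fun kv => decide (2 ≤ kv.2.length))
      ((pvPairs images).foldl (fun d p => d.modify p.1 [] (fun v => v ++ [p.2]))
        PySem.Dict.empty).items
    = (((pvPairs images).filter (fun p => decide (2 ≤ F.getD p.1 0))).foldl
        (fun d p => d.modify p.1 [] (fun v => v ++ [p.2])) PySem.Dict.empty).items := by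

  have hGk : ((pvPairs images).foldl (fun d p => d.modify p.1 [] (fun v => v ++ [p.2]))
      (PySem.Dict.empty : PySem.Dict String (List String))).keys
      = PySem.Set.ofList (pvAllTags images) := by
    rw [PySem.Dict.keys_foldl_modify_key (pvPairs images) (fun x => x.1) []
        (fun _ p => fun v => v ++ [p.2]) PySem.Dict.empty,
      PySem.Dict.keys_empty, PySem.Set.update_nil_left, pvPairs_map_fst]
  have hGn : ((pvPairs images).foldl (fun d p => d.modify p.1 [] (fun v => v ++ [p.2]))
      (PySem.Dict.empty : PySem.Dict String (List String))).keys.Nodup :=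
    PySem.Dict.nodup_keys_foldl_modify_key (pvPairs images) (fun x => x.1) []
      (fun _ p => fun v => v ++ [p.2]) PySem.Dict.empty PySem.Dict.nodup_keys_empty
  have hGd : ∀ k, ((pvPairs images).foldl (fun d p => d.modify p.1 [] (fun v => v ++ [p.2]))
      (PySem.Dict.empty : PySem.Dict String (List String))).getD k []
      = ((pvPairs images).filter (fun p => p.1 == k)).map (fun x => x.2) := by
    intro k
    rw [PySem.Dict.getD_foldl_modify_append, PySem.Dict.getD_empty, List.nil_append]
  have hRk : (((pvPairs images).filter (fun p => decide (2 ≤ F.getD p.1 0))).foldl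
      (fun d p => d.modify p.1 [] (fun v => v ++ [p.2]))
      (PySem.Dict.empty : PySem.Dict String (List String))).keys
      = PySem.Set.ofList (((pvPairs images).filter
          (fun p => decide (2 ≤ F.getD p.1 0))).map (fun x => x.1)) := by
    rw [PySem.Dict.keys_foldl_modify_key ((pvPairs images).filter
          (fun p => decide (2 ≤ F.getD p.1 0))) (fun x => x.1) []
        (fun _ p => fun v => v ++ [p.2]) PySem.Dict.empty,
      PySem.Dict.keys_empty, PySem.Set.update_nil_left]
  have hRn : (((pvPairs images).filter (fun p => decide (2 ≤ F.getD p.1 0))).foldl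
      (fun d p => d.modify p.1 [] (fun v => v ++ [p.2]))
      (PySem.Dict.empty : PySem.Dict String (List String))).keys.Nodup :=
    PySem.Dict.nodup_keys_foldl_modify_key ((pvPairs images).filter
        (fun p => decide (2 ≤ F.getD p.1 0))) (fun x => x.1) []
      (fun _ p => fun v => v ++ [p.2]) PySem.Dict.empty PySem.Dict.nodup_keys_empty
  have hRd : ∀ k, (((pvPairs images).filter (fun p => decide (2 ≤ F.getD p.1 0))).foldl
      (fun d p => d.modify p.1 [] (fun v => v ++ [p.2]))
      (PySem.Dict.empty : PySem.Dict String (List String))).getD k []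
      = (((pvPairs images).filter (fun p => decide (2 ≤ F.getD p.1 0))).filter
          (fun p => p.1 == k)).map (fun x => x.2) := by
    intro k
    rw [PySem.Dict.getD_foldl_modify_append, PySem.Dict.getD_empty, List.nil_append]
  have hcount : ∀ k, ((pvAllTags images).count k : Int)
      = (((pvPairs images).filter (fun p => p.1 == k)).length : Int) := by
    intro k
    rw [← pvPairs_map_fst, List.count_eq_countP, List.countP_map, ← List.countP_eq_length_filter]
    simp [Function.comp_def]
  have hlen : ∀ k, decide (2 ≤ F.getD k 0)
      = decide (2 ≤ (((pvPairs images).foldl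
          (fun d p => d.modify p.1 [] (fun v => v ++ [p.2]))
          (PySem.Dict.empty : PySem.Dict String (List String))).getD k []).length) := by
    intro k
    rw [hFq, hGd, List.length_map, decide_eq_decide, hcount]
    omega
  rw [PySem.Dict.items_eq_map_keys _ hGn [], PySem.Dict.items_eq_map_keys _ hRn [],
    List.filter_map]
  have hfc : ((pvPairs images).foldl (fun d p => d.modify p.1 [] (fun v => v ++ [p.2]))
      (PySem.Dict.empty : PySem.Dict String (List String))).keys.filter
        ((fun kv : String × List String => decide (2 ≤ kv.2.length)) ∘
          (fun k => (k, ((pvPairs images).foldl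
            (fun d p => d.modify p.1 [] (fun v => v ++ [p.2]))
            (PySem.Dict.empty : PySem.Dict String (List String))).getD k [])))
      = ((pvPairs images).foldl (fun d p => d.modify p.1 [] (fun v => v ++ [p.2]))
          (PySem.Dict.empty : PySem.Dict String (List String))).keys.filter
          (fun k => decide (2 ≤ F.getD k 0)) := by
    apply List.filter_congr
    intro k _
    simp only [Function.comp_apply]
    exact (hlen k).symm
  rw [hfc]
  have hkeys : ((pvPairs images).foldl (fun d p => d.modify p.1 [] (fun v => v ++ [p.2]))
      (PySem.Dict.empty : PySem.Dict String (List String))).keys.filter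
        (fun k => decide (2 ≤ F.getD k 0))
      = (((pvPairs images).filter (fun p => decide (2 ≤ F.getD p.1 0))).foldl
          (fun d p => d.modify p.1 [] (fun v => v ++ [p.2]))
          (PySem.Dict.empty : PySem.Dict String (List String))).keys := by
    rw [hGk, pv_ofList_filter', hRk, ← pvPairs_map_fst, List.filter_map]
    simp [Function.comp_def]
  rw [hkeys]
  apply List.map_congr_left
  intro k hk
  have hqk : decide (2 ≤ F.getD k 0) = true := by
    rw [hRk] at hk
    rcases (PySem.Set.mem_ofList _ _).mp hk with hmem
    rcases List.mem_map.mp hmem with ⟨p, hp, hpk⟩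
    rcases List.mem_filter.mp hp with ⟨_, hq⟩
    rw [← hpk]
    exact hq
  have h2 : (((pvPairs images).filter (fun p => decide (2 ≤ F.getD p.1 0))).filter
      (fun p => p.1 == k)) = (pvPairs images).filter (fun p => p.1 == k) := by
    rw [List.filter_filter]
    apply List.filter_congr
    intro a _
    by_cases hak : a.1 == k
    · have : a.1 = k := by simpa using hak
      simp [this, hqk]
    · simp [hak]
  rw [hGd, hRd, h2]

-- ===== VERDICT (by name: the statement is the Claim_ definition above) =====
theorem categorize_by_content_py_spec : Claim_equal_categorize_by_content_py := by
  intro images _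
  unfold Spec_categorize_by_content_py categorize_by_content_py categorize_by_content_py_alt
  have hT : ∀ (img : String × List (String × List String)),
      (PySem.Dict.mk img.2).getD "content_tags" [] = pvTags img := fun _ => rfl
  simp only [hT]
  rw [pv_catsA_eq, pv_res_eq]
  exact pv_main images _ (pv_freq_getD images)
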